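-- pv_equiv track=rewrite | github.com/ewartj/MedCAT | dictionaries/check_name_quality.py | count_string
-- ===== SOURCE A (Python) =====
-- def count_string(string, breakpoint):
--     d = {}
--     for c in string:
--         try:
--             d[c] += 1
--         except:
--             d[c] = 1
--     for v in d.items():
--         if v[1] >= breakpoint:
--             return False
-- ===== SOURCE B (Python) =====
-- def count_string(string, breakpoint):
--     prev = None
--     run = 0
--     for c in sorted(string):
--         if c == prev:
--             run += 1
--         else:
--             prev = c
--             run = 1
--         if run >= breakpoint:
--             return False
-- ===== Notes on version B (the rewrite author's own statement) =====
-- stated objective: alternative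
-- what changed: Replaced the dict frequency table plus a second pass over its items by sorting the characters and a single run-length scan over the sorted list that returns False as soon as a run reaches breakpoint.
import Mathlib
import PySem

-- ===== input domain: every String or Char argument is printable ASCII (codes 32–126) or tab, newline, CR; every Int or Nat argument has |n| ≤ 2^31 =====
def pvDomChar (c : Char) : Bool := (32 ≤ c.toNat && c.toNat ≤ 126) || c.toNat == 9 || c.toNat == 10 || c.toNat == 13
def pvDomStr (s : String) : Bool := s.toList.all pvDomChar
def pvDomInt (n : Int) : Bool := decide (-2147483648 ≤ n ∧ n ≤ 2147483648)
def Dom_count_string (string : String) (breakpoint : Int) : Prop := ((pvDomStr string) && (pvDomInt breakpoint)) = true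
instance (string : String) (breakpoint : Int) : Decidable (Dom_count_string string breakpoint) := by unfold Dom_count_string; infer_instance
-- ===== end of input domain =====

-- B replaces A's dict frequency table + items pass by sorting the characters and one run-length scan (alternative decomposition, same return values).

-- ===== PORT A =====
-- the 'for v in d.items(): if v[1] >= breakpoint: return False' loop (implicit None at the end)
def aLoop (breakpoint : Int) : List (Char × Int) → Option Bool
  | [] => none
  | v :: rest => if breakpoint ≤ v.2 then some false else aLoop breakpoint rest

def count_string (string : String) (breakpoint : Int) : Option Bool :=
  -- 'd[c] += 1' with try/except KeyError = d[c] = d.get(c, 0) + 1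
  let d := string.toList.foldl (fun d c => d.insert c (d.getD c 0 + 1)) PySem.Dict.empty
  aLoop breakpoint d.items

-- ===== PORT B =====
-- the 'for c in sorted(string)' loop carrying (prev, run); prev = None before the first iteration
def bLoop (breakpoint : Int) : Option Char → Int → List Char → Option Bool
  | _, _, [] => none
  | prev, run, c :: t =>
    let run' := if some c == prev then run + 1 else 1
    if breakpoint ≤ run' then some false else bLoop breakpoint (some c) run' t

def count_string_alt (string : String) (breakpoint : Int) : Option Bool :=
  bLoop breakpoint none 0 (PySem.List.sorted string.toList (fun c => c) false)

-- ===== PRECONDITION & SPEC =====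
def Spec_count_string (string : String) (breakpoint : Int) (out : Option Bool) : Prop := out = count_string_alt string breakpoint
instance (string : String) (breakpoint : Int) (out : Option Bool) : Decidable (Spec_count_string string breakpoint out) := by unfold Spec_count_string; infer_instance

-- ===== CLAIM (what is proved, stated in full; the proofs are below) =====
def Claim_equal_count_string : Prop := ∀ (string : String) (breakpoint : Int), Dom_count_string string breakpoint → Spec_count_string string breakpoint (count_string string breakpoint)

-- ===== LEMMAS AND PROOFS =====

-- A's items loop never returns some true
lemma aLoop_shape (bp : Int) (l : List (Char × Int)) :
    aLoop bp l = none ∨ aLoop bp l = some false := by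
  induction l with
  | nil => left; rfl
  | cons v rest ih =>
    simp only [aLoop]
    split_ifs with h
    · right; rfl
    · exact ih

lemma aLoop_false_iff (bp : Int) (l : List (Char × Int)) :
    aLoop bp l = some false ↔ ∃ v ∈ l, bp ≤ v.2 := by
  induction l with
  | nil => simp [aLoop]
  | cons v rest ih =>
    simp only [aLoop]
    split_ifs with h
    · simp [h]
    · simp only [ih, List.mem_cons]
      constructor
      · rintro ⟨w, hw, hle⟩; exact ⟨w, Or.inr hw, hle⟩
      · rintro ⟨w, hw | hw, hle⟩
        · exact absurd (hw ▸ hle) h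
        · exact ⟨w, hw, hle⟩

-- B's scan never returns some true
lemma bLoop_shape (bp : Int) (p : Option Char) (r : Int) (l : List Char) :
    bLoop bp p r l = none ∨ bLoop bp p r l = some false := by
  induction l generalizing p r with
  | nil => left; rfl
  | cons c t ih =>
    simp only [bLoop]
    split_ifs <;> first | exact Or.inr rfl | exact ih _ _

-- run-length invariant on the sorted tail: prev = some p, every remaining char ≥ p, run < bp
lemma bLoop_some_false_iff (bp : Int) (p : Char) (run : Int) (l : List Char)
    (hs : l.Pairwise (· ≤ ·)) (hall : ∀ x ∈ l, p ≤ x) (hrun : run < bp) :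
    bLoop bp (some p) run l = some false ↔
      bp ≤ run + (l.count p : Int) ∨ ∃ c ∈ l, c ≠ p ∧ bp ≤ (l.count c : Int) := by
  induction l generalizing p run with
  | nil =>
    simp only [bLoop, List.count_nil, List.not_mem_nil]
    constructor
    · intro h; cases h
    · rintro (h | ⟨c, hc, _⟩)
      · omega
      · exact absurd hc (by simp)
  | cons c t ih =>
    have hs' : t.Pairwise (· ≤ ·) := hs.tail
    have hct : ∀ x ∈ t, c ≤ x := fun x hx => List.rel_of_pairwise_cons hs hx
    by_cases hc : c = p
    · subst hc
      simp only [bLoop, beq_self_eq_true, if_true]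
      have hcount : (c :: t).count c = t.count c + 1 := List.count_cons_self
      split_ifs with hle
      · constructor
        · intro _
          left
          rw [hcount]; push_cast; omega
        · intro _; rfl
      · rw [ih c (run + 1) hs' hct (by omega)]
        constructor
        · rintro (h | ⟨d, hd, hdc, hle'⟩)
          · left; rw [hcount]; push_cast at *; omega
          · right
            exact ⟨d, List.mem_cons_of_mem _ hd, hdc, by simpa [List.count_cons, Ne.symm hdc] using hle'⟩
        · rintro (h | ⟨d, hd, hdc, hle'⟩)
          · left; rw [hcount] at h; push_cast at *; omega
          · right
            rcases List.mem_cons.mp hd with h1 | h1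
            · exact absurd h1 hdc
            · exact ⟨d, h1, hdc, by simpa [List.count_cons, Ne.symm hdc] using hle'⟩
    · -- c ≠ p : the run of p has ended; p occurs nowhere in c :: t
      have hpc : p < c := lt_of_le_of_ne (hall c (List.mem_cons_self)) (fun h => hc h.symm)
      have hpnot : (c :: t).count p = 0 := by
        rw [List.count_eq_zero]
        intro hmem
        rcases List.mem_cons.mp hmem with h1 | h1
        · exact absurd h1 (ne_of_lt hpc)
        · exact absurd rfl (ne_of_lt (lt_of_lt_of_le hpc (hct p h1)))
      have hbeq : (some c == some p) = false := by
        simp [hc]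
      simp only [bLoop, hbeq, Bool.false_eq_true, if_false]
      split_ifs with hle
      · constructor
        · intro _
          right
          refine ⟨c, List.mem_cons_self, hc, ?_⟩
          have : 1 ≤ (c :: t).count c := List.count_pos_iff.mpr (List.mem_cons_self)
          calc bp ≤ (1 : Int) := hle
            _ ≤ ((c :: t).count c : Int) := by exact_mod_cast this
        · intro _; rfl
      · rw [ih c 1 hs' hct (by omega)]
        have hcc : (c :: t).count c = t.count c + 1 := List.count_cons_self
        constructor
        · rintro (h | ⟨d, hd, hdc, hle'⟩)
          · right
            exact ⟨c, List.mem_cons_self, hc, by rw [hcc]; push_cast at *; omega⟩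
          · right
            have hdp : d ≠ p := ne_of_gt (lt_of_lt_of_le hpc (hct d hd))
            refine ⟨d, List.mem_cons_of_mem _ hd, hdp, ?_⟩
            simpa [List.count_cons, Ne.symm hdc] using hle'
        · rintro (h | ⟨d, hd, _, hle'⟩)
          · rw [hpnot] at h; push_cast at h; omega
          · rcases List.mem_cons.mp hd with h1 | h1
            · subst h1
              left; rw [hcc] at hle'; push_cast at *; omega
            · by_cases hdc : d = c
              · subst hdc
                left; rw [hcc] at hle'; push_cast at *; omega
              · right
                exact ⟨d, h1, hdc, by simpa [List.count_cons, Ne.symm hdc] using hle'⟩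

-- A returns False exactly when some character's count reaches breakpoint
lemma count_string_false_iff (s : String) (bp : Int) :
    count_string s bp = some false ↔ ∃ c ∈ s.toList, bp ≤ (s.toList.count c : Int) := by
  unfold count_string
  rw [PySem.Dict.foldl_insert_getD_add_one_eq_counter, aLoop_false_iff]
  simp only [PySem.Dict.items_counter, List.mem_map]
  constructor
  · rintro ⟨v, ⟨k, hk, rfl⟩, hle⟩
    exact ⟨k, (PySem.Set.mem_ofList _ _).mp hk, hle⟩
  · rintro ⟨c, hc, hle⟩
    exact ⟨(c, (s.toList.count c : Int)), ⟨c, (PySem.Set.mem_ofList _ _).mpr hc, rfl⟩, hle⟩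

-- B returns False exactly under the same condition
lemma count_string_alt_false_iff (s : String) (bp : Int) :
    count_string_alt s bp = some false ↔ ∃ c ∈ s.toList, bp ≤ (s.toList.count c : Int) := by
  unfold count_string_alt
  have hperm : (PySem.List.sorted s.toList (fun c => c) false).Perm s.toList :=
    PySem.List.sorted_perm _ _ _
  have hs : (PySem.List.sorted s.toList (fun c => c) false).Pairwise (· ≤ ·) :=
    PySem.List.sorted_pairwise _ _
  -- restate over the sorted list, then transfer along the permutation
  have key : ∀ (l : List Char), l.Pairwise (· ≤ ·) →
      (bLoop bp none 0 l = some false ↔ ∃ c ∈ l, bp ≤ (l.count c : Int)) := by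
    intro l hl
    cases l with
    | nil => simp [bLoop]
    | cons c t =>
      have hbeq : (some c == (none : Option Char)) = false := rfl
      simp only [bLoop, hbeq, Bool.false_eq_true, if_false]
      have hct : ∀ x ∈ t, c ≤ x := fun x hx => List.rel_of_pairwise_cons hl hx
      have hcc : (c :: t).count c = t.count c + 1 := List.count_cons_self
      split_ifs with hle
      · constructor
        · intro _
          refine ⟨c, List.mem_cons_self, ?_⟩
          have : 1 ≤ (c :: t).count c := List.count_pos_iff.mpr (List.mem_cons_self)
          calc bp ≤ (1 : Int) := hle
            _ ≤ ((c :: t).count c : Int) := by exact_mod_cast this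
        · intro _; rfl
      · rw [bLoop_some_false_iff bp c 1 t hl.tail hct (by omega)]
        constructor
        · rintro (h | ⟨d, hd, hdc, hle'⟩)
          · exact ⟨c, List.mem_cons_self, by rw [hcc]; push_cast at *; omega⟩
          · exact ⟨d, List.mem_cons_of_mem _ hd, by simpa [List.count_cons, Ne.symm hdc] using hle'⟩
        · rintro ⟨d, hd, hle'⟩
          rcases List.mem_cons.mp hd with h1 | h1
          · subst h1; left; rw [hcc] at hle'; push_cast at *; omega
          · by_cases hdc : d = c
            · subst hdc; left; rw [hcc] at hle'; push_cast at *; omega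
            · right
              exact ⟨d, h1, hdc, by simpa [List.count_cons, Ne.symm hdc] using hle'⟩
  rw [key _ hs]
  constructor
  · rintro ⟨c, hc, hle⟩
    exact ⟨c, hperm.mem_iff.mp hc, by rw [← hperm.count_eq]; exact hle⟩
  · rintro ⟨c, hc, hle⟩
    exact ⟨c, hperm.mem_iff.mpr hc, by rw [hperm.count_eq]; exact hle⟩

-- ===== VERDICT (by name: the statement is the Claim_ definition above) =====
theorem count_string_spec : Claim_equal_count_string := by
  intro s bp _
  unfold Spec_count_string
  have hiff := (count_string_false_iff s bp).trans (count_string_alt_false_iff s bp).symm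
  have hA : count_string s bp = none ∨ count_string s bp = some false := by
    unfold count_string; exact aLoop_shape _ _
  have hB : count_string_alt s bp = none ∨ count_string_alt s bp = some false := by
    unfold count_string_alt; exact bLoop_shape _ _ _ _
  rcases hA with hA | hA <;> rcases hB with hB | hB
  · rw [hA, hB]
  · have h := hiff.mpr hB; rw [hA] at h; exact absurd h (by simp)
  · have h := hiff.mp hA; rw [hB] at h; exact absurd h (by simp)
  · rw [hA, hB]
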